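-- pv_equiv track=rewrite | github.com/jang9205/Programmers_Algorithm | LEVEL2/귤 고르기.py | solution
-- ===== SOURCE A (Python) =====
-- def solution(k, tangerine):
--     dic = {}
--     count = 0
--
--     for i in tangerine:
--         if i in dic:
--             dic[i] += 1
--         else:
--             dic[i] = 1
--
--     values = sorted((value for value in dic.values()), reverse = True)
--
--     for result, j in enumerate(values):
--         count += j
--         if count >= k:
--             return result + 1
-- ===== SOURCE B (Python) =====
-- def solution(k, tangerine):
--     freq = {}
--     for t in tangerine:
--         freq[t] = freq.get(t, 0) + 1
--     bucket = {}
--     maxc = 0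
--     for c in freq.values():
--         bucket[c] = bucket.get(c, 0) + 1
--         if c > maxc:
--             maxc = c
--     total = 0
--     ans = 0
--     for c in range(maxc, 0, -1):
--         for _ in range(bucket.get(c, 0)):
--             total += c
--             ans += 1
--             if total >= k:
--                 return ans
-- ===== Notes on version B (the rewrite author's own statement) =====
-- stated objective: alternative
-- what changed: Replaces sorting the frequency values by a count-of-counts bucket dict scanned once from the maximum count downward, adding whole buckets element by element until the running total reaches k; trades the O(n log n) sort for an O(n + maxcount) counting scan (not measurably faster in CPython, where sorted() runs in C).
import Mathlib
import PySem

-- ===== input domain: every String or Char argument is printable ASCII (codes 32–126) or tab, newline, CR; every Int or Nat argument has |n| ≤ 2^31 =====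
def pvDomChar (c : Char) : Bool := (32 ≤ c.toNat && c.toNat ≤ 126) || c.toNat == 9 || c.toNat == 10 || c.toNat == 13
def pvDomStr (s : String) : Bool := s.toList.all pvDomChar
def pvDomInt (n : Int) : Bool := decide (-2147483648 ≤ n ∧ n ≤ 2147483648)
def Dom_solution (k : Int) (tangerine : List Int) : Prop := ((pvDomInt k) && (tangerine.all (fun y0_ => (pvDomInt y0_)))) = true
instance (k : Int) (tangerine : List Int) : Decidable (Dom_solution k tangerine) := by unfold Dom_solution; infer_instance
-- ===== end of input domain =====

-- B replaces sorting the frequency values by a count-of-counts bucket dict scanned from the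
-- maximum count downward (objective: alternative algorithm, counting scan instead of a sort).

-- ===== PORT A =====
-- A's 'for result, j in enumerate(values)' loop with its early return;
-- returns 0 on fall-through, where the Python A returns None (excluded by Pre_solution).
def solLoopA (k : Int) : List Int → Int → Int → Int
  | [], _, _ => 0
  | j :: t, count, result => if count + j ≥ k then result + 1 else solLoopA k t (count + j) (result + 1)

def solution (k : Int) (tangerine : List Int) : Int :=
  let dic := tangerine.foldl
    (fun d i => if d.contains i then d.insert i (d.getD i 0 + 1) else d.insert i 1)
    PySem.Dict.empty
  let values := PySem.List.sorted dic.values (fun v => v) true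
  solLoopA k values 0 0

-- ===== PORT B =====
-- B's inner 'for _ in range(bucket.get(c, 0))' loop: 'some r' is the early return.
def bInner (k c : Int) : Nat → Int → Int → Option Int × Int × Int
  | 0, total, ans => (none, total, ans)
  | m + 1, total, ans =>
      if total + c ≥ k then (some (ans + 1), total + c, ans + 1)
      else bInner k c m (total + c) (ans + 1)

-- B's outer 'for c in range(maxc, 0, -1)' loop; returns 0 on fall-through,
-- where the Python B returns None (excluded by Pre_solution).
def bOuter (k : Int) (bucket : PySem.Dict Int Int) : List Int → Int → Int → Int
  | [], _, _ => 0
  | c :: cs, total, ans =>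
      match bInner k c (bucket.getD c 0).toNat total ans with
      | (some r, _, _) => r
      | (none, t, a) => bOuter k bucket cs t a

def solution_alt (k : Int) (tangerine : List Int) : Int :=
  let freq := tangerine.foldl (fun d t => d.insert t (d.getD t 0 + 1)) PySem.Dict.empty
  let bm := freq.values.foldl
    (fun s c => (s.1.insert c (s.1.getD c 0 + 1), if c > s.2 then c else s.2))
    (PySem.Dict.empty, (0 : Int))
  bOuter k bm.1 (PySem.List.pyRange bm.2 0 (-1)) 0 0

-- ===== PRECONDITION & SPEC =====
-- Pre_ excludes exactly the inputs (empty list, or k larger than the total tangerine count) on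
-- which A falls off the final loop and returns None instead of an int.
def Pre_solution (k : Int) (tangerine : List Int) : Prop :=
  tangerine ≠ [] ∧ k ≤ tangerine.length
instance (k : Int) (tangerine : List Int) : Decidable (Pre_solution k tangerine) := by
  unfold Pre_solution; infer_instance
def pvWitness_solution : Int × List Int := (2, [1, 2, 2])

def Spec_solution (k : Int) (tangerine : List Int) (out : Int) : Prop := out = solution_alt k tangerine
instance (k : Int) (tangerine : List Int) (out : Int) : Decidable (Spec_solution k tangerine out) := by unfold Spec_solution; infer_instance

-- ===== CLAIM (what is proved, stated in full; the proofs are below) =====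
def Claim_equal_solution : Prop := ∀ (k : Int) (tangerine : List Int), Dom_solution k tangerine → Pre_solution k tangerine → Spec_solution k tangerine (solution k tangerine)

-- ===== LEMMAS AND PROOFS =====

-- B's inner loop followed by the rest of the traversal is A's loop over a replicate-block prefix.
theorem bInner_spec (k c : Int) (n : Nat) : ∀ (total ans : Int) (rest : List Int),
    (match bInner k c n total ans with
     | (some r, _, _) => r
     | (none, t, a) => solLoopA k rest t a) =
    solLoopA k (List.replicate n c ++ rest) total ans := by
  induction n with
  | zero => intro total ans rest; simp [bInner]
  | succ m ih =>
      intro total ans rest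
      simp only [List.replicate_succ, List.cons_append, solLoopA, bInner]
      by_cases h : total + c ≥ k
      · simp [h]
      · simp [h, ih]

-- B's outer loop is A's loop over the concatenation of the bucket blocks.
theorem bOuter_spec (k : Int) (bucket : PySem.Dict Int Int) : ∀ (cs : List Int) (total ans : Int),
    bOuter k bucket cs total ans =
    solLoopA k (cs.flatMap (fun c => List.replicate (bucket.getD c 0).toNat c)) total ans := by
  intro cs
  induction cs with
  | nil => intro total ans; simp [bOuter, List.flatMap_nil, solLoopA]
  | cons c cs ih =>
      intro total ans
      have h := bInner_spec k c (bucket.getD c 0).toNat total ans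
        (cs.flatMap (fun c => List.replicate (bucket.getD c 0).toNat c))
      simp only [bOuter, List.flatMap_cons]
      rw [← h]
      cases hb : bInner k c (bucket.getD c 0).toNat total ans with
      | mk o s =>
          cases o with
          | none => simp [ih]
          | some r => simp

-- A's branched counting loop builds Counter(tangerine).
theorem dicA_eq (tangerine : List Int) :
    tangerine.foldl
      (fun d i => if d.contains i then d.insert i (d.getD i 0 + 1) else d.insert i 1)
      PySem.Dict.empty = PySem.Dict.counter tangerine := by
  rw [PySem.List.foldl_congr_mem tangerine _ (fun d i => d.insert i (d.getD i 0 + 1))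
      PySem.Dict.empty ?_]
  · exact PySem.Dict.foldl_insert_getD_add_one_eq_counter tangerine
  · intro d i _
    by_cases h : d.contains i
    · simp [h]
    · have h0 : d.getD i 0 = 0 := PySem.Dict.getD_of_not_contains d 0 (by simpa using h)
      simp [h, h0]

-- every value of a counter is at least 1
theorem counter_values_pos (xs : List Int) :
    ∀ v ∈ (PySem.Dict.counter xs).values, 1 ≤ v := by
  intro v hv
  have : (PySem.Dict.counter xs).values =
      (PySem.Set.ofList xs).map (fun k => ((xs.count k : Int))) := by
    show ((PySem.Dict.counter xs).items).map (·.2) = _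
    rw [PySem.Dict.items_counter]
    simp
  rw [this] at hv
  obtain ⟨x, hx, rfl⟩ := List.mem_map.mp hv
  have hmem : x ∈ xs := (PySem.Set.mem_ofList xs x).mp hx
  have := List.count_pos_iff.mpr hmem
  omega

-- counts in the concatenation of replicate blocks over a Nodup index list
theorem count_flatMap_replicate (vs : List Int) : ∀ (cs : List Int), cs.Nodup → ∀ (a : Int),
    (cs.flatMap (fun c => List.replicate (vs.count c) c)).count a =
    if a ∈ cs then vs.count a else 0 := by
  intro cs
  induction cs with
  | nil => intro _ a; simp
  | cons c cs ih =>
      intro hnd a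
      have hnd' := (List.nodup_cons.mp hnd).2
      have hcn : c ∉ cs := (List.nodup_cons.mp hnd).1
      simp only [List.flatMap_cons, List.count_append, List.count_replicate, ih hnd' a,
        List.mem_cons]
      by_cases h : a = c
      · subst h
        simp [hcn]
      · simp [h, Ne.symm h]

-- the block concatenation is pairwise descending when the index list is strictly descending
theorem flat_pairwise (n : Int → Nat) : ∀ (cs : List Int), cs.Pairwise (· > ·) →
    (cs.flatMap (fun c => List.replicate (n c) c)).Pairwise (· ≥ ·) := by
  intro cs
  induction cs with
  | nil => intro _; simp
  | cons c cs ih =>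
      intro hp
      have hp' := (List.pairwise_cons.mp hp).2
      have hgt := (List.pairwise_cons.mp hp).1
      simp only [List.flatMap_cons]
      rw [List.pairwise_append]
      refine ⟨List.pairwise_replicate.mpr (Or.inr le_rfl), ih hp', ?_⟩
      intro a ha b hb
      have ha' : a = c := (List.eq_of_mem_replicate ha)
      obtain ⟨c', hc', hb'⟩ := List.mem_flatMap.mp hb
      have hb'' : b = c' := List.eq_of_mem_replicate hb'
      subst ha'
      rw [hb'']
      exact le_of_lt (hgt c' hc')

-- pyRange a 0 (-1) is strictly descending
theorem pyRange_down_pairwise (a : Int) :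
    (PySem.List.pyRange a 0 (-1)).Pairwise (· > ·) := by
  rw [PySem.List.pyRange_neg_one_eq_reverse]
  rw [List.pairwise_reverse]
  have : ∀ m : Nat, ∀ lo : Int, (PySem.List.pyRange lo (lo + m) 1).Pairwise (· < ·) := by
    intro m
    induction m with
    | zero => intro lo; simp [PySem.List.pyRange]
    | succ p ihp =>
        intro lo
        rw [PySem.List.pyRange_one_cons (by omega)]
        rw [List.pairwise_cons]
        constructor
        · intro b hb
          exact (PySem.List.mem_pyRange_one.mp hb).1
        · have := ihp (lo + 1)
          have heq : lo + 1 + (p : Int) = lo + (p + 1 : Nat) := by push_cast; ring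
          rw [heq] at this
          exact this
  by_cases h : 0 + 1 ≤ a + 1
  · have := this (a + 1 - (0 + 1)).toNat (0 + 1)
    have heq : (0 : Int) + 1 + ((a + 1 - (0 + 1)).toNat : Int) = a + 1 := by omega
    rw [heq] at this
    simpa using this
  · have : PySem.List.pyRange (0 + 1) (a + 1) 1 = [] := by
      simp [PySem.List.pyRange]
      omega
    rw [this]
    simp

-- main order lemma: the descending bucket traversal IS sorted(vs, reverse=True)
theorem sorted_desc_eq_flat (vs : List Int) (M : Int)
    (hb : ∀ v ∈ vs, 1 ≤ v ∧ v ≤ M) :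
    PySem.List.sorted vs (fun v => v) true =
    (PySem.List.pyRange M 0 (-1)).flatMap (fun c => List.replicate (vs.count c) c) := by
  have hpw := pyRange_down_pairwise M
  have hnd : (PySem.List.pyRange M 0 (-1)).Nodup := hpw.imp (fun h => ne_of_gt h)
  have hperm : ((PySem.List.pyRange M 0 (-1)).flatMap
      (fun c => List.replicate (vs.count c) c)).Perm vs := by
    rw [List.perm_iff_count]
    intro a
    rw [count_flatMap_replicate vs _ hnd a]
    by_cases h : a ∈ PySem.List.pyRange M 0 (-1)
    · simp [h]
    · simp only [h, if_false]
      symm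
      rw [List.count_eq_zero]
      intro hav
      exact h (PySem.List.mem_pyRange_neg_one.mpr ⟨by have := (hb a hav).1; omega, (hb a hav).2⟩)
  apply PySem.List.eq_of_perm_of_pairwise_le_of_injective (fun x : Int => -x)
  · intro x y h
    simpa using h
  · exact (PySem.List.sorted_perm vs _ true).trans hperm.symm
  · exact (PySem.List.sorted_pairwise_rev vs (fun v => v)).imp (fun h => by omega)
  · exact (flat_pairwise (fun c => vs.count c) _ hpw).imp (fun h => by omega)

-- ===== VERDICT (by name: the statement is the Claim_ definition above) =====
theorem solution_spec : Claim_equal_solution := by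
  intro k tangerine _ _
  show solution k tangerine = solution_alt k tangerine
  have hA : solution k tangerine =
      solLoopA k (PySem.List.sorted (PySem.Dict.counter tangerine).values (fun v => v) true) 0 0 := by
    simp only [solution, dicA_eq]
  have hB : solution_alt k tangerine =
      bOuter k (PySem.Dict.counter (PySem.Dict.counter tangerine).values)
        (PySem.List.pyRange ((PySem.Dict.counter tangerine).values.foldl
          (fun m c => if c > m then c else m) 0) 0 (-1)) 0 0 := by
    simp only [solution_alt, PySem.Dict.foldl_insert_getD_add_one_eq_counter]
    rw [PySem.List.foldl_prod_mk
      (f := fun (d : PySem.Dict Int Int) (c : Int) => PySem.Dict.insert d c (PySem.Dict.getD d c 0 + 1))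
      (g := fun (m c : Int) => if c > m then c else m),
      PySem.Dict.foldl_insert_getD_add_one_eq_counter]
  rw [hA, hB, bOuter_spec]
  have hmax : (PySem.Dict.counter tangerine).values.foldl
      (fun m c => if c > m then c else m) 0 =
      (PySem.Dict.counter tangerine).values.foldl max 0 := by
    apply PySem.List.foldl_congr_mem
    intro acc x _
    by_cases h : x > acc
    · simp [h, max_eq_right (le_of_lt h)]
    · simp only [h, if_false]
      omega
  rw [hmax]
  have hgetD : ∀ c : Int,
      ((PySem.Dict.counter (PySem.Dict.counter tangerine).values).getD c 0).toNat =
      (PySem.Dict.counter tangerine).values.count c := by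
    intro c
    rw [PySem.Dict.getD_counter]
    omega
  simp only [hgetD]
  rw [sorted_desc_eq_flat (PySem.Dict.counter tangerine).values
    ((PySem.Dict.counter tangerine).values.foldl max 0) ?_]
  intro v hv
  refine ⟨counter_values_pos tangerine v hv, ?_⟩
  exact (PySem.List.le_foldl_max (PySem.Dict.counter tangerine).values 0).2 v hv
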